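-- pv_equiv track=rewrite | github.com/mgirardin/Project-Euler-Solutions | Solutions_Python/P068.py | isSolution
-- ===== SOURCE A (Python) =====
-- def isSolution(perm):
-- 	sum1 = perm[order[0]]+perm[order[1]]+perm[order[2]]
-- 	i=3
-- 	for j in range(0,4):
-- 		if(sum1 != perm[order[i]]+perm[order[i+1]]+perm[order[i+2]]):
-- 			return False
-- 		i+=3
-- 	return True
--
-- order = [0,6,7,1,7,8,2,8,9,3,9,5,4,5,6]
-- ===== SOURCE B (Python) =====
-- # B: no `order` table and no triple sums. Uses the ring structure directly:
-- # line k is (external k, inner (k+1)%5, inner (k+2)%5), so all five line sums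
-- # are equal iff each consecutive pair agrees, i.e. for k=0..3
-- #   perm[k+1] - perm[k] == perm[5+(k+1)%5] - perm[5+(k+3)%5].
-- def isSolution(perm):
--     for k in range(4):
--         if perm[k + 1] - perm[k] != perm[5 + (k + 1) % 5] - perm[5 + (k + 3) % 5]:
--             return False
--     return True
-- ===== Notes on version B (the rewrite author's own statement) =====
-- stated objective: alternative
-- what changed: Drops the order table and the five triple sums entirely: B uses the pentagon-ring structure (line k = external k plus inners (k+1)%5,(k+2)%5) and checks the algebraically equivalent condition that each consecutive pair of line sums agrees, perm[k+1]-perm[k] == perm[5+(k+1)%5]-perm[5+(k+3)%5] for k=0..3.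
-- outside the precondition, e.g. on isSolution([1, 2, 3, 4, 5, 6, 7, 8, 9]): A returns False, B returns False
import Mathlib
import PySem

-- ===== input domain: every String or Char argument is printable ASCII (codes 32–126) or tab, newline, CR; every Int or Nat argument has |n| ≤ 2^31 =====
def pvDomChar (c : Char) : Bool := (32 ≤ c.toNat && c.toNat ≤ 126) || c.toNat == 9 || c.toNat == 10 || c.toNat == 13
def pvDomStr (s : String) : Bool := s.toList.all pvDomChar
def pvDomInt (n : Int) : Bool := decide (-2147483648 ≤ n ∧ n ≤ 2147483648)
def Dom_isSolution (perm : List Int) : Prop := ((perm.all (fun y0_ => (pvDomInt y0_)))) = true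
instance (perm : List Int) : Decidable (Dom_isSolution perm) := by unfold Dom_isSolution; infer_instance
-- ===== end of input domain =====

-- B drops the order table and the five triple sums: it checks, via the pentagon-ring
-- structure, that each consecutive pair of line sums agrees as a difference equation
-- (objective: alternative, same cost).

-- ===== PORT A =====
-- the module constant `order`
def pvOrder : List Int := [0, 6, 7, 1, 7, 8, 2, 8, 9, 3, 9, 5, 4, 5, 6]

-- perm[order[j]] — exact whenever both indices are in range (guaranteed under Pre_)
def pvGet (perm : List Int) (j : Int) : Int :=
  PySem.List.pyGetD perm (PySem.List.pyGetD pvOrder j 0) 0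

def isSolutionLoop (perm : List Int) (sum1 : Int) : List Int → Int → Bool
  | [], _ => true
  | _ :: js, i =>
    if sum1 ≠ pvGet perm i + pvGet perm (i + 1) + pvGet perm (i + 2) then false
    else isSolutionLoop perm sum1 js (i + 3)

def isSolution (perm : List Int) : Bool :=
  let sum1 := pvGet perm 0 + pvGet perm 1 + pvGet perm 2
  isSolutionLoop perm sum1 (PySem.List.pyRange 0 4 1) 3

-- ===== PORT B =====
-- perm[i] for an in-range nonnegative index (guaranteed under Pre_)
def pvAt (perm : List Int) (i : Int) : Int := PySem.List.pyGetD perm i 0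

def isSolutionAltLoop (perm : List Int) : List Int → Bool
  | [] => true
  | k :: ks =>
    if pvAt perm (k + 1) - pvAt perm k
         ≠ pvAt perm (5 + PySem.Int.mod (k + 1) 5) - pvAt perm (5 + PySem.Int.mod (k + 3) 5)
    then false
    else isSolutionAltLoop perm ks

def isSolution_alt (perm : List Int) : Bool :=
  isSolutionAltLoop perm (PySem.List.pyRange 0 4 1)

-- ===== PRECONDITION & SPEC =====
-- Pre_ excludes lists shorter than 10, on which A raises IndexError unless an early
-- mismatch short-circuits first; where A does return on such lists B happens to
-- return the same value, so the exclusion is only for A's (and B's) crashes.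
def Pre_isSolution (perm : List Int) : Prop := 10 ≤ perm.length
instance (perm : List Int) : Decidable (Pre_isSolution perm) := by unfold Pre_isSolution; infer_instance
def pvWitness_isSolution : List Int := [0, 1, 2, 3, 4, 5, 6, 7, 8, 9]

def Spec_isSolution (perm : List Int) (out : Bool) : Prop := out = isSolution_alt perm
instance (perm : List Int) (out : Bool) : Decidable (Spec_isSolution perm out) := by unfold Spec_isSolution; infer_instance

-- ===== CLAIM (what is proved, stated in full; the proofs are below) =====
def Claim_equal_isSolution : Prop := ∀ (perm : List Int), Dom_isSolution perm → Pre_isSolution perm → Spec_isSolution perm (isSolution perm)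

-- ===== LEMMAS AND PROOFS =====
-- pvGet on a length-≥10 list picks the named element
lemma pvGet_elem (a b c d e f g h i j : Int) (rest : List Int) (k : Int) (n : Nat)
    (hk : PySem.List.pyGetD pvOrder k 0 = (n : Int)) (hn : n < 10) :
    pvGet (a :: b :: c :: d :: e :: f :: g :: h :: i :: j :: rest) k
      = [a, b, c, d, e, f, g, h, i, j].getD n 0 := by
  rw [pvGet, hk, PySem.List.pyGetD_natCast]
  rcases n with _|_|_|_|_|_|_|_|_|_|n <;> simp_all <;> omega

lemma pvAt_elem (a b c d e f g h i j : Int) (rest : List Int) (k : Int) (n : Nat)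
    (hk : k = (n : Int)) (hn : n < 10) :
    pvAt (a :: b :: c :: d :: e :: f :: g :: h :: i :: j :: rest) k
      = [a, b, c, d, e, f, g, h, i, j].getD n 0 := by
  rw [pvAt, hk, PySem.List.pyGetD_natCast]
  rcases n with _|_|_|_|_|_|_|_|_|_|n <;> simp_all <;> omega

-- A's anchored equality chain equals B's consecutive difference chain
lemma pv_chain_eq (a b c d e f g h i j : Int) :
    ((decide (a + g + h = b + h + i)) && ((decide (a + g + h = c + i + j))
      && ((decide (a + g + h = d + j + f)) && (decide (a + g + h = e + f + g)))))
    = ((decide (b - a = g - i)) && ((decide (c - b = h - j))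
      && ((decide (d - c = i - f)) && (decide (e - d = j - g))))) := by
  by_cases h1 : a + g + h = b + h + i <;> by_cases h2 : a + g + h = c + i + j <;>
    by_cases h3 : a + g + h = d + j + f <;> by_cases h4 : a + g + h = e + f + g <;>
    simp_all <;> omega

lemma isSolution_key (a b c d e f g h i j : Int) (rest : List Int) :
    isSolution (a :: b :: c :: d :: e :: f :: g :: h :: i :: j :: rest)
      = isSolution_alt (a :: b :: c :: d :: e :: f :: g :: h :: i :: j :: rest) := by
  have hr4 : PySem.List.pyRange 0 4 1 = [0, 1, 2, 3] := by decide
  rw [isSolution, isSolution_alt, hr4]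
  simp only [isSolutionLoop, isSolutionAltLoop]
  norm_num
  rw [pvGet_elem a b c d e f g h i j rest 0 0 (by decide) (by omega),
      pvGet_elem a b c d e f g h i j rest 1 6 (by decide) (by omega),
      pvGet_elem a b c d e f g h i j rest 2 7 (by decide) (by omega),
      pvGet_elem a b c d e f g h i j rest 3 1 (by decide) (by omega),
      pvGet_elem a b c d e f g h i j rest 4 7 (by decide) (by omega),
      pvGet_elem a b c d e f g h i j rest 5 8 (by decide) (by omega),
      pvGet_elem a b c d e f g h i j rest 6 2 (by decide) (by omega),
      pvGet_elem a b c d e f g h i j rest 7 8 (by decide) (by omega),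
      pvGet_elem a b c d e f g h i j rest 8 9 (by decide) (by omega),
      pvGet_elem a b c d e f g h i j rest 9 3 (by decide) (by omega),
      pvGet_elem a b c d e f g h i j rest 10 9 (by decide) (by omega),
      pvGet_elem a b c d e f g h i j rest 11 5 (by decide) (by omega),
      pvGet_elem a b c d e f g h i j rest 12 4 (by decide) (by omega),
      pvGet_elem a b c d e f g h i j rest 13 5 (by decide) (by omega),
      pvGet_elem a b c d e f g h i j rest 14 6 (by decide) (by omega)]
  rw [pvAt_elem a b c d e f g h i j rest 0 0 rfl (by omega),
      pvAt_elem a b c d e f g h i j rest 1 1 rfl (by omega),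
      pvAt_elem a b c d e f g h i j rest 2 2 rfl (by omega),
      pvAt_elem a b c d e f g h i j rest 3 3 rfl (by omega),
      pvAt_elem a b c d e f g h i j rest 4 4 rfl (by omega),
      pvAt_elem a b c d e f g h i j rest 5 5 rfl (by omega),
      pvAt_elem a b c d e f g h i j rest 6 6 rfl (by omega),
      pvAt_elem a b c d e f g h i j rest 7 7 rfl (by omega),
      pvAt_elem a b c d e f g h i j rest 8 8 rfl (by omega),
      pvAt_elem a b c d e f g h i j rest 9 9 rfl (by omega)]
  simp only [List.getD]
  norm_num
  exact pv_chain_eq a b c d e f g h i j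

-- ===== VERDICT (by name: the statement is the Claim_ definition above) =====
theorem isSolution_spec : Claim_equal_isSolution := by
  intro perm _ hpre
  unfold Spec_isSolution
  match perm, hpre with
  | a :: b :: c :: d :: e :: f :: g :: h :: i :: j :: rest, _ =>
    exact isSolution_key a b c d e f g h i j rest
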